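-- pv_equiv track=rewrite | github.com/PratikDavidson/CodeChef_July_Challenge | CodeChef_XxOoRr.py | min_op
-- ===== SOURCE A (Python) =====
-- def min_op(A,N,K):
--
--     maxi = max(A)
--     k = 1
--     while maxi//2:
--         maxi //= 2
--         k += 1
--     b = [0]*N
--     s = [0]*k
--     c = 0
--     for i in range(N):
--         b[i] = binary_op(A[i],k)
--     for i in range(N):
--         for j in range(k):
--             s[j] += b[i][j]
--     for i in range(k):
--         if s[i]%K == 0:
--             c += s[i]//K
--         else:
--             c += s[i]//K+1
--     return c
--
-- def binary_op(a,k):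
--     b = [0]*k
--     if a != 0:
--         i = -1
--         while a//2:
--             b[i] = a%2
--             a //= 2
--             i -= 1
--         b[i] = 1
--     return b.copy()
-- ===== SOURCE B (Python) =====
-- def min_op(A, N, K):
--     cnt = {}
--     for i in range(N):
--         a = A[i]
--         while a:
--             j = (a ^ (a - 1)).bit_length() - 1   # position of the lowest set bit
--             cnt[j] = cnt.get(j, 0) + 1
--             a &= a - 1                           # clear it
--     return sum(-(-v // K) for v in cnt.values())
-- ===== Notes on version B (the rewrite author's own statement) =====
-- stated objective: alternative
-- what changed: B discards A's whole dense pipeline (max, bit-width loop, binary_op, the N-by-k bit table and its column sums): it collects set-bit positions sparsely with the Kernighan a&=a-1 lowest-bit trick into a dict counter and sums ceiling divisions -(-v//K) over the nonzero counts only.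
import Mathlib
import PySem

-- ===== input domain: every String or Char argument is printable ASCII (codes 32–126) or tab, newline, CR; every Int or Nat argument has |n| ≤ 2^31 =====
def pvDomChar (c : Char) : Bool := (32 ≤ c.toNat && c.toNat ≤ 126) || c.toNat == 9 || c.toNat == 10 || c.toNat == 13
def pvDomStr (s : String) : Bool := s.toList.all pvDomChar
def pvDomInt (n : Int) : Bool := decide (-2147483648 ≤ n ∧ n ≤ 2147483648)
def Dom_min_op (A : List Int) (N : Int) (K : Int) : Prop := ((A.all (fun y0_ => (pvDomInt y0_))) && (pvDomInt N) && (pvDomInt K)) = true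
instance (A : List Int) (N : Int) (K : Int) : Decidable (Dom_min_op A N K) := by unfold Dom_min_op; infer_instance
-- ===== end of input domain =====

-- B replaces A's dense pipeline (max + bit-width loop + per-element binary lists + N×k table +
-- column sums) by a sparse dict counter of set-bit positions collected with the a &= a-1
-- lowest-bit trick, summing ceiling divisions over the nonzero counts only (objective: alternative).

-- ===== PORT A =====
-- 'while maxi//2: maxi //= 2; k += 1' — fueled; fuel natAbs+1 suffices on Pre_ (maxi ≥ 0)
def pvKLoop : Nat → Int → Int → Int × Int
  | 0, maxi, k => (maxi, k)
  | fuel+1, maxi, k =>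
    if PySem.Int.floordiv maxi 2 ≠ 0 then pvKLoop fuel (PySem.Int.floordiv maxi 2) (k+1)
    else (maxi, k)

-- 'while a//2: b[i] = a%2; a //= 2; i -= 1' — fueled; fuel natAbs+1 suffices on Pre_ (a ≥ 1)
def pvBinLoop : Nat → Int → Int → List Int → Int × List Int
  | 0, _, i, b => (i, b)
  | fuel+1, a, i, b =>
    if PySem.Int.floordiv a 2 ≠ 0 then
      pvBinLoop fuel (PySem.Int.floordiv a 2) (i-1) (PySem.List.pySetD b i (PySem.Int.mod a 2))
    else (i, b)

def binary_op (a kk : Int) : List Int :=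
  let b : List Int := List.replicate kk.toNat 0
  if a ≠ 0 then
    let r := pvBinLoop (a.natAbs + 1) a (-1) b
    PySem.List.pySetD r.2 r.1 1
  else b

-- Python's b=[0]*N holds ints until each slot is overwritten with a list; inside Pre_ every
-- slot is written before it is read, so the initial placeholders are modelled as [].
def min_op (A : List Int) (N : Int) (K : Int) : Int :=
  let maxi := (PySem.List.max? A (fun x => x)).getD 0   -- max(A); Pre_ excludes A = [] (ValueError)
  let k := (pvKLoop (maxi.natAbs + 1) maxi 1).2
  let b := (PySem.List.pyRange 0 N 1).foldl
    (fun b i => PySem.List.pySetD b i (binary_op (PySem.List.pyGetD A i 0) k))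
    (List.replicate N.toNat ([] : List Int))
  let s := (PySem.List.pyRange 0 N 1).foldl
    (fun s i => (PySem.List.pyRange 0 k 1).foldl
      (fun s j => PySem.List.pySetD s j
        (PySem.List.pyGetD s j 0 + PySem.List.pyGetD (PySem.List.pyGetD b i []) j 0)) s)
    (List.replicate k.toNat 0)
  (PySem.List.pyRange 0 k 1).foldl
    (fun c i =>
      if PySem.Int.mod (PySem.List.pyGetD s i 0) K = 0 then
        c + PySem.Int.floordiv (PySem.List.pyGetD s i 0) K
      else
        c + (PySem.Int.floordiv (PySem.List.pyGetD s i 0) K + 1)) 0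

-- ===== PORT B =====
-- 'while a: j = (a ^ (a-1)).bit_length() - 1; cnt[j] = cnt.get(j,0)+1; a &= a-1' — fueled;
-- fuel natAbs+1 suffices on Pre_ (a ≥ 0: one iteration per set bit)
def pvBitLoop : Nat → Int → PySem.Dict Int Int → PySem.Dict Int Int
  | 0, _, d => d
  | fuel+1, a, d =>
    if a ≠ 0 then
      let j : Int := ((PySem.Int.bitLength (PySem.Int.bxor a (a - 1)) : Nat) : Int) - 1
      pvBitLoop fuel (PySem.Int.band a (a - 1)) (d.insert j ((d.getD j 0) + 1))
    else d

def min_op_alt (A : List Int) (N : Int) (K : Int) : Int :=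
  let cnt := (PySem.List.pyRange 0 N 1).foldl
    (fun d i => pvBitLoop ((PySem.List.pyGetD A i 0).natAbs + 1) (PySem.List.pyGetD A i 0) d)
    PySem.Dict.empty
  ((PySem.Dict.values cnt).map (fun v => -(PySem.Int.floordiv (-v) K))).sum

-- ===== PRECONDITION & SPEC =====
-- Pre_ excludes only inputs where A raises or diverges: A = [] (max raises ValueError),
-- K = 0 (ZeroDivisionError), N > len(A) (IndexError), and a negative element among the
-- first N or max(A) < 0 (A's halving loops never terminate).
def Pre_min_op (A : List Int) (N : Int) (K : Int) : Prop :=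
  A ≠ [] ∧ K ≠ 0 ∧ N ≤ A.length ∧
  (∀ a ∈ A.take N.toNat, 0 ≤ a) ∧ (∃ a ∈ A, 0 ≤ a)
instance (A : List Int) (N : Int) (K : Int) : Decidable (Pre_min_op A N K) := by
  unfold Pre_min_op; infer_instance
def pvWitness_min_op : List Int × Int × Int := ([3, 1], 2, 2)
def Spec_min_op (A : List Int) (N : Int) (K : Int) (out : Int) : Prop := out = min_op_alt A N K
instance (A : List Int) (N : Int) (K : Int) (out : Int) : Decidable (Spec_min_op A N K out) := by
  unfold Spec_min_op; infer_instance

-- ===== CLAIM (what is proved, stated in full; the proofs are below) =====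
def Claim_equal_min_op : Prop := ∀ (A : List Int) (N : Int) (K : Int),
  Dom_min_op A N K → Pre_min_op A N K → Spec_min_op A N K (min_op A N K)

-- ===== LEMMAS AND PROOFS =====

theorem floordiv_cast_two (n : Nat) :
    PySem.Int.floordiv (n : Int) 2 = ((n / 2 : Nat) : Int) := by
  exact_mod_cast PySem.Int.floordiv_natCast n 2

theorem mod_cast_two (n : Nat) :
    PySem.Int.mod (n : Int) 2 = ((n % 2 : Nat) : Int) := by
  exact_mod_cast PySem.Int.mod_natCast n 2

-- bits of n, least significant first, no trailing zeros
def bitsLSB (n : Nat) : List Int :=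
  if n = 0 then [] else ((n % 2 : Nat) : Int) :: bitsLSB (n / 2)
decreasing_by exact Nat.div_lt_self (Nat.pos_of_ne_zero (by assumption)) (by norm_num)

-- first k bits of a, least significant first
def bitsPad : Int → Nat → List Int
  | _, 0 => []
  | a, k+1 => PySem.Int.mod a 2 :: bitsPad (PySem.Int.floordiv a 2) k

theorem length_bitsPad (a : Int) (k : Nat) : (bitsPad a k).length = k := by
  induction k generalizing a with
  | zero => rfl
  | succ k ih => simp [bitsPad, ih]

theorem bitsPad_zero (k : Nat) : bitsPad 0 k = List.replicate k 0 := by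
  induction k with
  | zero => rfl
  | succ k ih =>
    have h0 : PySem.Int.floordiv 0 2 = 0 := by decide
    have h1 : PySem.Int.mod 0 2 = 0 := by decide
    simp only [bitsPad, h0, h1, ih, List.replicate_succ]

theorem len_bitsLSB (n : Nat) : (bitsLSB n).length = PySem.Int.bitLength (n : Int) := by
  induction n using Nat.strong_induction_on with
  | _ n ih =>
    by_cases h : n = 0
    · subst h; rw [bitsLSB]; simp [PySem.Int.bitLength_zero]
    · rw [bitsLSB]; simp only [h, if_false, List.length_cons]
      rw [PySem.Int.bitLength_natCast (Nat.pos_of_ne_zero h)]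
      rw [ih (n / 2) (Nat.div_lt_self (Nat.pos_of_ne_zero h) (by norm_num))]

theorem bitLength_pos (n : Nat) (h : n ≠ 0) : 1 ≤ PySem.Int.bitLength (n : Int) := by
  by_contra hh
  have hlt := PySem.Int.lt_two_pow_bitLength (n : Int)
  have h0 : PySem.Int.bitLength (n : Int) = 0 := by omega
  rw [h0] at hlt
  simp at hlt
  omega

theorem bitsLSB_le (n k : Nat) (h : n < 2 ^ k) : (bitsLSB n).length ≤ k := by
  rw [len_bitsLSB]
  by_cases h0 : n = 0
  · subst h0; simp [PySem.Int.bitLength_zero]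
  · have h1 := PySem.Int.two_pow_bitLength_le (n : Int) (by exact_mod_cast h0)
    rw [Int.natAbs_natCast] at h1
    have hlt : 2 ^ (PySem.Int.bitLength ((n : Nat) : Int) - 1) < 2 ^ k := lt_of_le_of_lt h1 h
    have := (Nat.pow_lt_pow_iff_right (by norm_num : 1 < 2)).1 hlt
    have := bitLength_pos n h0
    omega

theorem bitsLSB_len_succ (n : Nat) (h : n ≠ 0) :
    (bitsLSB n).length = (bitsLSB (n / 2)).length + 1 := by
  rw [bitsLSB]; simp [h]

theorem bitsLSB_zero : bitsLSB 0 = [] := by rw [bitsLSB]; simp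

theorem bitsLSB_one : bitsLSB 1 = [1] := by
  rw [bitsLSB]; simp [bitsLSB_zero]

theorem bitsPad_eq (n k : Nat) (h : n < 2 ^ k) :
    bitsPad (n : Int) k = bitsLSB n ++ List.replicate (k - (bitsLSB n).length) 0 := by
  induction k generalizing n with
  | zero =>
    have : n = 0 := by simpa using h
    subst this
    rw [bitsLSB_zero]; simp [bitsPad]
  | succ k ih =>
    by_cases h0 : n = 0
    · subst h0
      simp only [Nat.cast_zero]
      rw [bitsPad_zero, bitsLSB_zero]; simp
    · have hd : n / 2 < 2 ^ k := by
        have h2 : n < 2 ^ k * 2 := by rw [pow_succ] at h; omega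
        omega
      simp only [bitsPad, mod_cast_two, floordiv_cast_two]
      rw [ih (n / 2) hd]
      conv_rhs => rw [bitsLSB]
      simp only [h0, if_false, List.cons_append, List.length_cons, Nat.succ_sub_succ]

theorem bitsPad_getElem (k : Nat) (a : Int) (ha : 0 ≤ a) (j : Nat) (h : j < k) :
    (bitsPad a k)[j]'(by simp [length_bitsPad, h]) = PySem.Int.band (a >>> j) 1 := by
  induction k generalizing a j with
  | zero => omega
  | succ k ih =>
    cases j with
    | zero =>
      show PySem.Int.mod a 2 = _
      have h0 : a >>> (0 : Nat) = a := by
        rw [Int.shiftRight_eq_div_pow]; simp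
      rw [h0, PySem.Int.band_one]
    | succ j =>
      have ha2 : 0 ≤ PySem.Int.floordiv a 2 := by
        rw [PySem.Int.floordiv_eq_ediv_of_pos (by norm_num)]
        exact Int.ediv_nonneg ha (by norm_num)
      have hstep : PySem.Int.floordiv a 2 >>> j = a >>> (j + 1) := by
        obtain ⟨an, rfl⟩ := Int.eq_ofNat_of_zero_le ha
        have e1 : ∀ (m j' : Nat), ((m : Int) >>> j') = ((m >>> j' : Nat) : Int) := by
          intro m j'; simp [Int.shiftRight_eq_div_pow, Nat.shiftRight_eq_div_pow]
        rw [floordiv_cast_two, e1, e1]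
        norm_cast
        simp only [Nat.shiftRight_eq_div_pow, Nat.div_div_eq_div_mul]
        rw [pow_succ, Nat.mul_comm]
      have := ih (PySem.Int.floordiv a 2) ha2 j (by omega)
      show (bitsPad (PySem.Int.floordiv a 2) k)[j]'(by simp [length_bitsPad]; omega) = _
      rw [this, hstep]

theorem pvKLoop_spec (fuel : Nat) (m c : Int) (hm : 0 ≤ m) (hf : m.natAbs < fuel) :
    (pvKLoop fuel m c).2 = c + max ((PySem.Int.bitLength m : Nat) : Int) 1 - 1 := by
  induction fuel generalizing m c with
  | zero => omega
  | succ fuel ih =>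
    obtain ⟨mn, rfl⟩ := Int.eq_ofNat_of_zero_le hm
    simp only [pvKLoop, floordiv_cast_two]
    by_cases h2 : mn / 2 = 0
    · simp only [h2, Nat.cast_zero, ne_eq, not_true_eq_false, if_false]
      have hc : mn = 0 ∨ mn = 1 := by omega
      rcases hc with h | h <;> subst h
      · simp [PySem.Int.bitLength_zero]
      · have hb : PySem.Int.bitLength ((1 : Nat) : Int) = 1 := by decide
        rw [hb]; simp
    · rw [if_pos (by exact_mod_cast h2)]
      rw [Int.natAbs_natCast] at hf
      have hlt : mn / 2 < mn := Nat.div_lt_self (by omega) (by norm_num)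
      rw [ih ((mn / 2 : Nat) : Int) (c + 1) (by positivity)
        (by rw [Int.natAbs_natCast]; omega)]
      have hb := PySem.Int.bitLength_natCast (show 0 < mn by omega)
      have hp : 1 ≤ PySem.Int.bitLength ((mn / 2 : Nat) : Int) := bitLength_pos (mn / 2) h2
      have hp' : (1 : Int) ≤ ((PySem.Int.bitLength ((mn / 2 : Nat) : Int) : Nat) : Int) := by
        exact_mod_cast hp
      rw [hb]
      simp only [Nat.cast_add, Nat.cast_one]
      rw [max_eq_left hp', max_eq_left (by linarith)]
      ring

theorem pySetD_neg (xs : List Int) (kk : Nat) (v : Int) (h1 : 0 < kk) (h2 : kk ≤ xs.length) :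
    PySem.List.pySetD xs (-(kk : Int)) v = xs.set (xs.length - kk) v := by
  have h0 : ¬ (0 ≤ -(kk : Int)) := by omega
  have h3 : -(xs.length : Int) ≤ -(kk : Int) := by omega
  simp only [PySem.List.pySetD, PySem.List.pySet?, PySem.List.pyIdx?, if_neg h0, if_pos h3,
    neg_neg, Int.toNat_natCast, Option.map_some, Option.getD_some]

theorem set_replicate_succ_append (m : Nat) (t : List Int) (v : Int) :
    (List.replicate (m + 1) (0 : Int) ++ t).set m v = List.replicate m 0 ++ (v :: t) := by
  rw [List.replicate_succ', List.append_assoc]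
  rw [List.set_append]
  rw [if_neg (by simp)]
  simp

theorem pvBinLoop_spec (fuel n : Nat) (t : List Int) (m : Nat) (h1 : 1 ≤ n) (hf : n ≤ fuel) :
    PySem.List.pySetD
      (pvBinLoop fuel (n : Int) (-(t.length : Int) - 1)
        (List.replicate (m + (bitsLSB n).length) 0 ++ t)).2
      (pvBinLoop fuel (n : Int) (-(t.length : Int) - 1)
        (List.replicate (m + (bitsLSB n).length) 0 ++ t)).1 1
    = List.replicate m 0 ++ ((bitsLSB n).reverse ++ t) := by
  induction fuel generalizing n t m with
  | zero => omega
  | succ fuel ih =>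
    simp only [pvBinLoop, floordiv_cast_two, mod_cast_two]
    by_cases h2 : n / 2 = 0
    · have hn1 : n = 1 := by omega
      subst hn1
      simp only [h2, Nat.cast_zero, ne_eq, not_true_eq_false, if_false]
      rw [bitsLSB_one]
      simp only [List.length_cons, List.length_nil, Nat.zero_add]
      have e1 : -(t.length : Int) - 1 = -((t.length + 1 : Nat) : Int) := by push_cast; ring
      rw [e1, pySetD_neg _ _ _ (by omega) (by simp)]
      have e2 : (List.replicate (m + 1) (0 : Int) ++ t).length - (t.length + 1) = m := by
        simp only [List.length_append, List.length_replicate]; omega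
      rw [e2, set_replicate_succ_append]
      simp
    · rw [if_pos (by exact_mod_cast h2)]
      have hlen : (bitsLSB n).length = (bitsLSB (n / 2)).length + 1 :=
        bitsLSB_len_succ n (by omega)
      have e1 : -(t.length : Int) - 1 = -((t.length + 1 : Nat) : Int) := by push_cast; ring
      have hset : PySem.List.pySetD (List.replicate (m + (bitsLSB n).length) (0 : Int) ++ t)
          (-(t.length : Int) - 1) ((n % 2 : Nat) : Int)
          = List.replicate (m + (bitsLSB (n / 2)).length) 0 ++ (((n % 2 : Nat) : Int) :: t) := by
        rw [e1, pySetD_neg _ _ _ (by omega)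
          (by simp only [List.length_append, List.length_replicate, hlen]; omega)]
        have e2 : (List.replicate (m + (bitsLSB n).length) (0 : Int) ++ t).length
            - (t.length + 1) = m + (bitsLSB (n / 2)).length := by
          simp only [List.length_append, List.length_replicate, hlen]; omega
        rw [e2, hlen, show m + ((bitsLSB (n / 2)).length + 1)
            = (m + (bitsLSB (n / 2)).length) + 1 by omega, set_replicate_succ_append]
      rw [hset]
      have e3 : -(t.length : Int) - 1 - 1
          = -(((((n % 2 : Nat) : Int) :: t)).length : Int) - 1 := by
        simp only [List.length_cons]; push_cast; ring
      rw [e3]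
      rw [ih (n / 2) (((n % 2 : Nat) : Int) :: t) m (by omega) (by omega)]
      conv_rhs => rw [bitsLSB]
      simp only [show ¬ n = 0 by omega, if_false, List.reverse_cons, List.append_assoc,
        List.cons_append, List.nil_append]

theorem binary_op_eq (n k : Nat) (_hk : 1 ≤ k) (h : n < 2 ^ k) :
    binary_op (n : Int) (k : Int) = (bitsPad (n : Int) k).reverse := by
  by_cases h0 : n = 0
  · subst h0
    simp [binary_op, bitsPad_zero, List.reverse_replicate]
  · unfold binary_op
    rw [if_pos (by exact_mod_cast h0)]
    have hle := bitsLSB_le n k h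
    have e2 : List.replicate ((k : Int)).toNat (0 : Int)
        = List.replicate ((k - (bitsLSB n).length) + (bitsLSB n).length) 0 ++ [] := by
      simp; omega
    have e3 : (-1 : Int) = -(([] : List Int).length : Int) - 1 := by simp
    have e4 : ((n : Int)).natAbs + 1 = n + 1 := by simp
    simp only [e2, e3, e4]
    rw [pvBinLoop_spec (n + 1) n [] (k - (bitsLSB n).length) (by omega) (by omega)]
    rw [bitsPad_eq n k h]
    simp [List.reverse_append, List.reverse_replicate]

theorem table_fold_aux (f : Int → List Int) (xs : List Int) (n : Nat) (h : n ≤ xs.length)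
    (j : Nat) (hj : j ≤ n) :
    (List.range j).foldl
      (fun b (i : Nat) => PySem.List.pySetD b (i : Int) (f (PySem.List.pyGetD xs (i : Int) 0)))
      (List.replicate n ([] : List Int))
    = (xs.take j).map f ++ List.replicate (n - j) [] := by
  induction j with
  | zero => simp
  | succ j ih =>
    rw [List.range_succ, List.foldl_append, ih (by omega)]
    simp only [List.foldl_cons, List.foldl_nil]
    rw [PySem.List.pySetD_natCast, PySem.List.pyGetD_natCast]
    have hjx : j < xs.length := by omega
    rw [List.getD_eq_getElem xs 0 hjx]
    rw [List.set_append]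
    have hlen : ((xs.take j).map f).length = j := by simp; omega
    rw [if_neg (by omega)]
    rw [hlen]
    have e1 : n - j = (n - (j + 1)) + 1 := by omega
    rw [Nat.sub_self, e1, List.replicate_succ]
    have e2 : (([] : List Int) :: List.replicate (n - (j + 1)) []).set 0 (f xs[j])
        = f xs[j] :: List.replicate (n - (j + 1)) [] := by simp
    rw [e2]
    have e3 : (xs.take (j + 1)).map f = (xs.take j).map f ++ [f xs[j]] := by
      rw [List.take_add_one, List.getElem?_eq_getElem hjx]
      simp only [Option.toList_some, List.map_append, List.map_cons, List.map_nil]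
    rw [e3, List.append_assoc]
    simp

theorem table_fold (f : Int → List Int) (xs : List Int) (n : Nat) (h : n ≤ xs.length) :
    (PySem.List.pyRange 0 (n : Int) 1).foldl
      (fun b i => PySem.List.pySetD b i (f (PySem.List.pyGetD xs i 0)))
      (List.replicate n ([] : List Int)) = (xs.take n).map f := by
  rw [PySem.List.pyRange_zero_natCast, List.foldl_map]
  rw [table_fold_aux f xs n h n (le_refl n)]
  simp

theorem inner_fold_aux (s row : List Int) (kn : Nat) (hs : s.length = kn) (hr : row.length = kn)
    (j : Nat) (hj : j ≤ kn) :
    (List.range j).foldl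
      (fun s' (i : Nat) => PySem.List.pySetD s' (i : Int)
        (PySem.List.pyGetD s' (i : Int) 0 + PySem.List.pyGetD row (i : Int) 0)) s
    = List.zipWith (· + ·) (s.take j) (row.take j) ++ s.drop j := by
  induction j with
  | zero => simp
  | succ j ih =>
    rw [List.range_succ, List.foldl_append, ih (by omega)]
    simp only [List.foldl_cons, List.foldl_nil]
    have hjs : j < s.length := by omega
    have hjr : j < row.length := by omega
    have hzlen : (List.zipWith (· + ·) (s.take j) (row.take j)).length = j := by
      simp; omega
    rw [PySem.List.pySetD_natCast, PySem.List.pyGetD_natCast, PySem.List.pyGetD_natCast]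
    have hget : (List.zipWith (· + ·) (s.take j) (row.take j) ++ s.drop j).getD j 0 = s[j] := by
      rw [List.getD_eq_getElem _ 0 (by simp; omega)]
      rw [List.getElem_append_right (by omega)]
      simp [hzlen]
    rw [hget, List.getD_eq_getElem row 0 hjr]
    rw [List.set_append, if_neg (by omega), hzlen, Nat.sub_self]
    rw [List.drop_eq_getElem_cons hjs]
    simp only [List.set_cons_zero]
    rw [List.take_add_one, List.take_add_one,
      List.getElem?_eq_getElem hjs, List.getElem?_eq_getElem hjr]
    rw [List.zipWith_append (by simp; omega)]
    simp

theorem inner_fold (s row : List Int) (kn : Nat) (hs : s.length = kn) (hr : row.length = kn) :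
    (PySem.List.pyRange 0 (kn : Int) 1).foldl
      (fun s' j => PySem.List.pySetD s' j
        (PySem.List.pyGetD s' j 0 + PySem.List.pyGetD row j 0)) s
    = List.zipWith (· + ·) s row := by
  rw [PySem.List.pyRange_zero_natCast, List.foldl_map]
  rw [inner_fold_aux s row kn hs hr kn (le_refl kn)]
  rw [← hs, List.take_length, List.drop_length]
  rw [show row.take s.length = row from by rw [List.take_of_length_le (by omega)]]
  simp

theorem fold_rows (rows : List (List Int)) (s : List Int) (kn : Nat)
    (hs : s.length = kn) (hr : ∀ r ∈ rows, r.length = kn) :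
    rows.foldl (fun s' row => (PySem.List.pyRange 0 (kn : Int) 1).foldl
      (fun s'' j => PySem.List.pySetD s'' j
        (PySem.List.pyGetD s'' j 0 + PySem.List.pyGetD row j 0)) s') s
    = rows.foldl (fun s' row => List.zipWith (· + ·) s' row) s := by
  induction rows generalizing s with
  | nil => rfl
  | cons r rows ih =>
    simp only [List.foldl_cons]
    rw [inner_fold s r kn hs (hr r (by simp))]
    exact ih (List.zipWith (· + ·) s r)
      (by simp [hs, hr r (by simp)]) (fun r' h' => hr r' (by simp [h']))

theorem length_fold_zipWith (rows : List (List Int)) (s : List Int)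
    (hr : ∀ r ∈ rows, r.length = s.length) :
    (rows.foldl (fun s' row => List.zipWith (· + ·) s' row) s).length = s.length := by
  induction rows generalizing s with
  | nil => rfl
  | cons r rows ih =>
    simp only [List.foldl_cons]
    have h1 : (List.zipWith (· + ·) s r).length = s.length := by
      simp [hr r (by simp)]
    rw [ih (List.zipWith (· + ·) s r) (fun r' h' => by rw [h1]; exact hr r' (by simp [h']))]
    exact h1

theorem rev_fold (rows : List (List Int)) (s : List Int)
    (hr : ∀ r ∈ rows, r.length = s.length) :
    (rows.map List.reverse).foldl (fun s' r => List.zipWith (· + ·) s' r) s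
    = (rows.foldl (fun t r => List.zipWith (· + ·) t r) s.reverse).reverse := by
  induction rows generalizing s with
  | nil => simp
  | cons r rows ih =>
    simp only [List.map_cons, List.foldl_cons]
    have hlen : s.length = r.length := (hr r (by simp)).symm
    have e1 : (List.zipWith (· + ·) s r.reverse).reverse
        = List.zipWith (· + ·) s.reverse r := by
      rw [List.reverse_zipWith (by simp [hlen])]
      rw [List.reverse_reverse]
    have hlen2 : ∀ r' ∈ rows, r'.length = (List.zipWith (· + ·) s r.reverse).length := by
      intro r' h'
      simp [hr r' (by simp [h']), hlen]
    rw [ih (List.zipWith (· + ·) s r.reverse) hlen2, e1]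

-- ===== new lemmas for port B =====

-- Nat doubling facts for ^^^ and &&&
theorem xor_odd (k : Nat) : (2*k+1) ^^^ (2*k) = 1 := by
  simpa [Nat.bit, two_mul] using Nat.xor_bit true k false k

theorem land_odd (k : Nat) : (2*k+1) &&& (2*k) = 2*k := by
  simpa [Nat.bit, two_mul] using Nat.land_bit true k false k

theorem xor_even (m : Nat) (h : 0 < m) : (2*m) ^^^ (2*m - 1) = 2*(m ^^^ (m-1)) + 1 := by
  have h1 := Nat.xor_bit false m true (m-1)
  simp [Nat.bit] at h1
  rw [show 2*m - 1 = 2*(m-1)+1 by omega]; exact h1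

theorem land_even (m : Nat) (h : 0 < m) : (2*m) &&& (2*m - 1) = 2*(m &&& (m-1)) := by
  have h1 := Nat.land_bit false m true (m-1)
  simp [Nat.bit] at h1
  rw [show 2*m - 1 = 2*(m-1)+1 by omega]; exact h1

-- positions of the set bits of n, least significant first, offset j
def posAux : Nat → Int → List Int
  | 0, _ => []
  | n+1, j => (if (n+1) % 2 = 1 then [j] else []) ++ posAux ((n+1)/2) (j+1)
decreasing_by exact Nat.div_lt_self (Nat.succ_pos n) (by norm_num)

theorem posAux_pos (n : Nat) (j : Int) (h : 0 < n) :
    posAux n j = (if n % 2 = 1 then [j] else []) ++ posAux (n/2) (j+1) := by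
  cases n with
  | zero => omega
  | succ n => rw [posAux]

theorem posAux_double (m : Nat) (j : Int) : posAux (2*m) j = posAux m (j+1) := by
  cases m with
  | zero => simp [posAux]
  | succ m =>
    rw [posAux_pos _ _ (by omega)]
    simp [Nat.mul_mod_right]

theorem posAux_ge (n : Nat) : ∀ (j : Int), ∀ x ∈ posAux n j, j ≤ x := by
  induction n using Nat.strong_induction_on with
  | _ n ih =>
    intro j x hx
    by_cases h0 : n = 0
    · subst h0; simp [posAux] at hx
    · rw [posAux_pos n j (by omega)] at hx
      rcases List.mem_append.1 hx with h | h
      · split_ifs at h <;> simp at h; omega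
      · have := ih (n/2) (Nat.div_lt_self (by omega) (by norm_num)) (j+1) x h
        omega

theorem posAux_lt (n : Nat) : ∀ (b : Nat) (j : Int), n < 2 ^ b →
    ∀ x ∈ posAux n j, x < j + (b : Int) := by
  induction n using Nat.strong_induction_on with
  | _ n ih =>
    intro b j hb x hx
    by_cases h0 : n = 0
    · subst h0; simp [posAux] at hx
    · rw [posAux_pos n j (by omega)] at hx
      have hb1 : 1 ≤ b := by
        by_contra hh
        have : b = 0 := by omega
        subst this; simp at hb; omega
      rcases List.mem_append.1 hx with h | h
      · split_ifs at h <;> simp at h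
        subst h; omega
      · have hd : n / 2 < 2 ^ (b - 1) := by
          have h2 : 2 ^ b = 2 * 2 ^ (b - 1) := by
            rw [← pow_succ']; congr 1; omega
          omega
        have := ih (n/2) (Nat.div_lt_self (by omega) (by norm_num)) (b-1) (j+1) hd x h
        have e : ((b - 1 : Nat) : Int) = (b : Int) - 1 := by omega
        omega

theorem posAux_count (n : Nat) : ∀ (j : Int) (i : Nat),
    (posAux n j).count (j + (i : Int)) = ((n >>> i) % 2 : Nat) := by
  induction n using Nat.strong_induction_on with
  | _ n ih =>
    intro j i
    by_cases h0 : n = 0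
    · subst h0; simp [posAux]
    · rw [posAux_pos n j (by omega), List.count_append]
      cases i with
      | zero =>
        have htail : (posAux (n/2) (j+1)).count (j + ((0:Nat) : Int)) = 0 := by
          rw [List.count_eq_zero]
          intro hmem
          have := posAux_ge (n/2) (j+1) _ hmem
          omega
        rw [htail]
        have : n >>> 0 = n := by simp
        rw [this]
        split_ifs with h
        · simp [h]
        · have : n % 2 = 0 := by omega
          simp [this]
      | succ i =>
        have hhead : (if n % 2 = 1 then [j] else []).count (j + ((i+1 : Nat) : Int)) = 0 := by
          split_ifs
          · rw [List.count_eq_zero]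
            simp
            omega
          · simp
        rw [hhead]
        have e : j + ((i+1 : Nat) : Int) = (j + 1) + (i : Int) := by push_cast; ring
        rw [e, ih (n/2) (Nat.div_lt_self (by omega) (by norm_num)) (j+1) i]
        have : n >>> (i+1) = (n/2) >>> i := by
          rw [show i + 1 = 1 + i by omega, Nat.shiftRight_add, Nat.shiftRight_one]
        rw [this]
        omega

-- Kernighan step: the first position is bit_length(n ^ (n-1)) - 1 and a &= a-1 drops it
theorem kernighan_step (n : Nat) : ∀ (j : Int), 0 < n →
    posAux n j = (j + (((PySem.Int.bitLength ((n ^^^ (n-1) : Nat) : Int)) : Int) - 1))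
      :: posAux (n &&& (n-1)) j := by
  induction n using Nat.strong_induction_on with
  | _ n ih =>
    intro j hn
    by_cases hodd : n % 2 = 1
    · have hk : n = 2*(n/2)+1 := by omega
      have hx : n ^^^ (n-1) = 1 := by
        conv_lhs => rw [hk, show 2*(n/2)+1-1 = 2*(n/2) by omega]
        exact xor_odd (n/2)
      have hl : n &&& (n-1) = 2*(n/2) := by
        conv_lhs => rw [hk, show 2*(n/2)+1-1 = 2*(n/2) by omega]
        exact land_odd (n/2)
      rw [hx, hl, posAux_double]
      have hb1 : PySem.Int.bitLength ((1:Nat) : Int) = 1 := by decide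
      rw [hb1]
      rw [posAux_pos n j hn, if_pos hodd]
      simp
    · have hm : 0 < n / 2 := by omega
      have hk : n = 2*(n/2) := by omega
      set m := n / 2 with hmdef
      have hx : n ^^^ (n-1) = 2*(m ^^^ (m-1)) + 1 := by
        conv_lhs => rw [hk]
        exact xor_even m hm
      have hl : n &&& (n-1) = 2*(m &&& (m-1)) := by
        conv_lhs => rw [hk]
        exact land_even m hm
      have hbl : PySem.Int.bitLength ((2*(m ^^^ (m-1)) + 1 : Nat) : Int)
          = PySem.Int.bitLength ((m ^^^ (m-1) : Nat) : Int) + 1 := by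
        rw [PySem.Int.bitLength_natCast (by omega)]
        congr 2
        omega
      have hstep : posAux n j = posAux m (j+1) := by
        conv_lhs => rw [hk]
        exact posAux_double m j
      rw [hstep, ih m (by omega) (j+1) hm, hx, hl, hbl, posAux_double]
      congr 1
      push_cast
      ring

-- pvBitLoop collects the set-bit positions into the dict, one counter bump per bit
theorem pvBitLoop_spec (n : Nat) : ∀ (fuel : Nat) (d : PySem.Dict Int Int), n < fuel →
    pvBitLoop fuel (n : Int) d
    = (posAux n 0).foldl (fun d j => d.insert j (d.getD j 0 + 1)) d := by
  induction n using Nat.strong_induction_on with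
  | _ n ih =>
    intro fuel d hf
    cases fuel with
    | zero => omega
    | succ fuel =>
      by_cases h0 : n = 0
      · subst h0
        simp [pvBitLoop, posAux]
      · rw [pvBitLoop, if_pos (by exact_mod_cast h0)]
        have e1 : ((n : Int)) - 1 = ((n - 1 : Nat) : Int) := by omega
        have e2 : PySem.Int.bxor (n : Int) ((n - 1 : Nat) : Int)
            = ((n ^^^ (n-1) : Nat) : Int) := PySem.Int.bxor_natCast n (n-1)
        have e3 : PySem.Int.band (n : Int) ((n - 1 : Nat) : Int)
            = ((n &&& (n-1) : Nat) : Int) := PySem.Int.band_natCast n (n-1)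
        rw [e1, e2, e3]
        have hlt : n &&& (n-1) < n := by
          have h1 : n &&& (n - 1) ≤ n - 1 := Nat.and_le_right
          omega
        rw [ih (n &&& (n-1)) hlt fuel _ (by omega)]
        rw [kernighan_step n 0 (by omega)]
        simp only [List.foldl_cons, zero_add]

-- the outer loop over range(N) is a fold over the first N elements
theorem b_outer_aux (A : List Int) : ∀ (j : Nat), j ≤ A.length → ∀ (e : PySem.Dict Int Int),
    (List.range j).foldl
      (fun d (i : Nat) => pvBitLoop ((PySem.List.pyGetD A (i : Int) 0).natAbs + 1)
        (PySem.List.pyGetD A (i : Int) 0) d) e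
    = (A.take j).foldl (fun d a => pvBitLoop (a.natAbs + 1) a d) e := by
  intro j
  induction j with
  | zero => intro _ e; simp
  | succ j ih =>
    intro hj e
    rw [List.range_succ, List.foldl_append, ih (by omega) e]
    simp only [List.foldl_cons, List.foldl_nil]
    rw [PySem.List.pyGetD_natCast, List.getD_eq_getElem A 0 (by omega)]
    rw [List.take_add_one, List.getElem?_eq_getElem (by omega : j < A.length)]
    rw [Option.toList_some, List.foldl_append]
    simp

-- range(a, b) over a nonpositive bound is empty, so range(N) = range(toNat N)
theorem pyRange_toNat (N : Int) :
    PySem.List.pyRange 0 N 1 = PySem.List.pyRange 0 ((N.toNat : Nat) : Int) 1 := by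
  by_cases h : N ≤ 0
  · rw [PySem.List.pyRange_one_eq_nil h, show N.toNat = 0 by omega]
    rfl
  · rw [show ((N.toNat : Nat) : Int) = N by omega]

-- Python ceiling division: s//K (+1 unless K divides s) is -((-s)//K), every K ≠ 0
theorem ceil_div_eq (v K : Int) (hK : K ≠ 0) :
    (if PySem.Int.mod v K = 0 then PySem.Int.floordiv v K else PySem.Int.floordiv v K + 1)
    = -(PySem.Int.floordiv (-v) K) := by
  have main : ∀ (w B : Int), 0 < B →
      (if PySem.Int.mod w B = 0 then PySem.Int.floordiv w B else PySem.Int.floordiv w B + 1)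
      = -(PySem.Int.floordiv (-w) B) := by
    intro w B hB
    have hfm := PySem.Int.floordiv_mul_add_mod w B
    have h0 : 0 ≤ PySem.Int.mod w B := PySem.Int.mod_nonneg w hB
    have hlt : PySem.Int.mod w B < B := PySem.Int.mod_lt w hB
    rw [eq_comm]
    apply (@PySem.Int.neg_floordiv_neg_eq_iff_of_pos w B _ hB).2
    split_ifs with h
    · constructor <;> nlinarith
    · have hpos : 0 < PySem.Int.mod w B := lt_of_le_of_ne h0 (Ne.symm h)
      constructor <;> nlinarith
  by_cases hpos : 0 < K
  · exact main v K hpos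
  · have hB : 0 < -K := by omega
    have h1 : PySem.Int.mod v K = -PySem.Int.mod (-v) (-K) := by
      have := PySem.Int.mod_neg_neg (-v) (-K)
      simpa using this
    have h2 : PySem.Int.floordiv v K = PySem.Int.floordiv (-v) (-K) := by
      have := PySem.Int.floordiv_neg_neg (-v) (-K)
      simpa using this.symm
    have h3 : PySem.Int.floordiv (-v) K = PySem.Int.floordiv v (-K) := by
      have := PySem.Int.floordiv_neg_neg v (-K)
      simpa using this
    simp only [h1, h2, h3, neg_eq_zero]
    have hmain := main (-v) (-K) hB
    rw [neg_neg] at hmain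
    rw [hmain]

theorem floordiv_zero_left (K : Int) (hK : K ≠ 0) : PySem.Int.floordiv 0 K = 0 := by
  have hfm := PySem.Int.floordiv_mul_add_mod 0 K
  have hm : PySem.Int.mod 0 K = 0 := (PySem.Int.mod_eq_zero_iff_dvd 0 K).2 ⟨0, by ring⟩
  rw [hm, add_zero] at hfm
  rcases mul_eq_zero.1 hfm with h | h
  · exact h
  · omega

theorem ceil_zero (K : Int) (hK : K ≠ 0) :
    (if PySem.Int.mod (0:Int) K = 0 then PySem.Int.floordiv 0 K
      else PySem.Int.floordiv 0 K + 1) = 0 := by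
  have hm : PySem.Int.mod 0 K = 0 := (PySem.Int.mod_eq_zero_iff_dvd 0 K).2 ⟨0, by ring⟩
  rw [if_pos hm, floordiv_zero_left K hK]

-- pointwise value of the zipWith-sum fold
theorem getD_zipWith_add (a b : List Int) (h : a.length = b.length) (j : Nat) :
    (List.zipWith (· + ·) a b).getD j 0 = a.getD j 0 + b.getD j 0 := by
  rcases lt_or_ge j a.length with hj | hj
  · rw [List.getD_eq_getElem _ 0 (by simp; omega), List.getD_eq_getElem a 0 hj,
      List.getD_eq_getElem b 0 (by omega), List.getElem_zipWith]
  · rw [List.getD_eq_default _ 0 (by simp; omega), List.getD_eq_default a 0 hj,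
      List.getD_eq_default b 0 (by omega)]
    simp

theorem getD_fold_zip (rows : List (List Int)) : ∀ (init : List Int),
    (∀ r ∈ rows, r.length = init.length) → ∀ (j : Nat),
    (rows.foldl (fun s r => List.zipWith (· + ·) s r) init).getD j 0
    = init.getD j 0 + (rows.map (fun r => r.getD j 0)).sum := by
  induction rows with
  | nil => simp
  | cons r rows ih =>
    intro init hlen j
    simp only [List.foldl_cons, List.map_cons, List.sum_cons]
    have h1 : (List.zipWith (· + ·) init r).length = init.length := by
      simp [hlen r (by simp)]
    rw [ih (List.zipWith (· + ·) init r)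
      (fun r' h' => by rw [h1]; exact hlen r' (by simp [h'])) j]
    rw [getD_zipWith_add init r (hlen r (by simp)).symm j]
    ring

-- a list is the range-indexed list of its entries
theorem list_eq_map_range_getD (S : List Int) :
    S = (List.range S.length).map (fun j => S.getD j 0) := by
  apply List.ext_getElem
  · simp
  · intro i h1 h2
    simp [List.getD, List.getElem?_eq_getElem h1]

theorem count_flatMap (l : List Int) (f : Int → List Int) (x : Int) :
    (l.flatMap f).count x = ((l.map (fun a => (f a).count x)).sum) := by
  induction l with
  | nil => simp
  | cons a l ih => simp [List.count_append, ih]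

-- summing F over a nodup superset of L's support equals summing over L's distinct elements
theorem sum_over_superset (L M : List Int) (hM : M.Nodup) (hsub : ∀ x ∈ L, x ∈ M)
    (F : Int → Int) (h0 : ∀ x, x ∉ L → F x = 0) :
    (M.map F).sum = ((PySem.Set.ofList L).map F).sum := by
  rw [← List.sum_toFinset F hM, ← List.sum_toFinset F (PySem.Set.nodup_ofList L)]
  rw [eq_comm]
  apply Finset.sum_subset
  · intro x hx
    rw [List.mem_toFinset] at hx ⊢
    exact hsub x ((PySem.Set.mem_ofList L x).1 hx)
  · intro x _ hx
    rw [List.mem_toFinset] at hx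
    apply h0
    intro hxL
    exact hx ((PySem.Set.mem_ofList L x).2 hxL)


-- ===== VERDICT (by name: the statement is the Claim_ definition above) =====
theorem min_op_spec : Claim_equal_min_op := by
  intro A N K _hDom hPre
  obtain ⟨hA, hK, hNlen, hTake, hEx⟩ := hPre
  obtain ⟨mx, hmx⟩ : ∃ mx, PySem.List.max? A (fun x => x) = some mx := by
    cases hq : PySem.List.max? A (fun x => x) with
    | none => exact absurd ((PySem.List.max?_eq_none_iff A _).1 hq) hA
    | some m => exact ⟨m, rfl⟩
  have hmax : ∀ y ∈ A, y ≤ mx := by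
    have := PySem.List.max?_isMax hmx
    simpa using this
  have hmx0 : 0 ≤ mx := by
    obtain ⟨a, haA, ha0⟩ := hEx
    exact le_trans ha0 (hmax a haA)
  set kn : Nat := max (PySem.Int.bitLength mx) 1 with hkn
  have hkn1 : 1 ≤ kn := by omega
  set n : Nat := N.toNat with hn
  have hnlen : n ≤ A.length := by omega
  have hrows0 : ∀ a ∈ A.take n, 0 ≤ a := hTake
  have hpowle : (2 : Nat) ^ PySem.Int.bitLength mx ≤ 2 ^ kn :=
    Nat.pow_le_pow_right (by norm_num) (by omega)
  have hbound : ∀ a ∈ A.take n, a.toNat < 2 ^ kn := by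
    intro a hmem
    have h1 : a ≤ mx := hmax a (List.take_subset n A hmem)
    have h2 : mx.natAbs < 2 ^ PySem.Int.bitLength mx := PySem.Int.lt_two_pow_bitLength mx
    have h4 : a.toNat ≤ mx.natAbs := by
      have := hrows0 a hmem; omega
    exact lt_of_le_of_lt h4 (lt_of_lt_of_le h2 hpowle)
  -- the multiset of set-bit positions of the processed elements
  set L : List Int := (A.take n).flatMap (fun a => posAux a.toNat 0) with hL
  have hLmem : ∀ x ∈ L, 0 ≤ x ∧ x < (kn : Int) := by
    intro x hx
    rw [hL, List.mem_flatMap] at hx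
    obtain ⟨a, haA, hxa⟩ := hx
    constructor
    · exact posAux_ge a.toNat 0 x hxa
    · have := posAux_lt a.toNat kn 0 (hbound a haA) x hxa
      omega
  unfold Spec_min_op
  -- ===== A's side =====
  simp only [min_op, hmx, Option.getD_some]
  rw [pvKLoop_spec (mx.natAbs + 1) mx 1 hmx0 (by omega)]
  have hkA : (1 : Int) + max ((PySem.Int.bitLength mx : Nat) : Int) 1 - 1
      = ((kn : Nat) : Int) := by
    rw [hkn]; push_cast; omega
  rw [hkA, pyRange_toNat N, ← hn]
  simp only [Int.toNat_natCast]
  rw [table_fold (fun x => binary_op x (kn : Int)) A n hnlen]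
  have hmapeq : (A.take n).map (fun x => binary_op x (kn : Int))
      = (A.take n).map (fun x => (bitsPad x kn).reverse) := by
    apply List.map_congr_left
    intro a hmem
    have ha0 := hrows0 a hmem
    obtain ⟨an, rfl⟩ := Int.eq_ofNat_of_zero_le ha0
    have hb : an < 2 ^ kn := by
      have := hbound _ hmem; simpa using this
    exact binary_op_eq an kn hkn1 hb
  rw [hmapeq]
  set rows : List (List Int) := (A.take n).map (fun x => (bitsPad x kn).reverse) with hrowsdef
  set init : List Int := List.replicate kn (0 : Int) with hinit
  have hlenrows : rows.length = n := by
    rw [hrowsdef]; simp; omega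
  have hrowlen : ∀ r ∈ rows, r.length = kn := by
    intro r hr
    rw [hrowsdef] at hr
    obtain ⟨x, _, rfl⟩ := List.mem_map.1 hr
    simp [length_bitsPad]
  have houter : (PySem.List.pyRange 0 (n : Int) 1).foldl
      (fun s i => (PySem.List.pyRange 0 (kn : Int) 1).foldl
        (fun s' j => PySem.List.pySetD s' j
          (PySem.List.pyGetD s' j 0 + PySem.List.pyGetD (PySem.List.pyGetD rows i []) j 0)) s)
      init
      = rows.foldl (fun s row => (PySem.List.pyRange 0 (kn : Int) 1).foldl
          (fun s' j => PySem.List.pySetD s' j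
            (PySem.List.pyGetD s' j 0 + PySem.List.pyGetD row j 0)) s) init := by
    conv_lhs => rw [show ((n : Nat) : Int) = ((rows.length : Nat) : Int) by rw [hlenrows]]
    exact PySem.List.foldl_pyRange_zero_pyGetD' rows []
      (fun s row => (PySem.List.pyRange 0 (kn : Int) 1).foldl
        (fun s' j => PySem.List.pySetD s' j
          (PySem.List.pyGetD s' j 0 + PySem.List.pyGetD row j 0)) s) init
  rw [houter]
  rw [fold_rows rows init kn (by rw [hinit]; simp) hrowlen]
  have hrowsrev : rows = ((A.take n).map (fun x => bitsPad x kn)).map List.reverse := by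
    rw [hrowsdef, List.map_map]
    rfl
  rw [hrowsrev]
  rw [rev_fold ((A.take n).map (fun x => bitsPad x kn)) init (by
    intro r hr
    obtain ⟨x, _, rfl⟩ := List.mem_map.1 hr
    rw [hinit]
    simp [length_bitsPad])]
  rw [show init.reverse = init from by rw [hinit]; simp]
  set S : List Int := ((A.take n).map (fun x => bitsPad x kn)).foldl
    (fun t r => List.zipWith (· + ·) t r) init with hS
  have hSlen : S.length = kn := by
    rw [hS]
    rw [length_fold_zipWith _ init (by
      intro r hr
      obtain ⟨x, _, rfl⟩ := List.mem_map.1 hr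
      rw [hinit]
      simp [length_bitsPad])]
    rw [hinit]; simp
  have hfinalA : (PySem.List.pyRange 0 (kn : Int) 1).foldl
      (fun c i =>
        if PySem.Int.mod (PySem.List.pyGetD S.reverse i 0) K = 0 then
          c + PySem.Int.floordiv (PySem.List.pyGetD S.reverse i 0) K
        else
          c + (PySem.Int.floordiv (PySem.List.pyGetD S.reverse i 0) K + 1)) 0
      = S.reverse.foldl (fun c v =>
          if PySem.Int.mod v K = 0 then c + PySem.Int.floordiv v K
          else c + (PySem.Int.floordiv v K + 1)) 0 := by
    conv_lhs => rw [show ((kn : Nat) : Int) = ((S.reverse.length : Nat) : Int) by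
      rw [List.length_reverse, hSlen]]
    exact PySem.List.foldl_pyRange_zero_pyGetD' S.reverse 0
      (fun c v =>
        if PySem.Int.mod v K = 0 then c + PySem.Int.floordiv v K
        else c + (PySem.Int.floordiv v K + 1)) 0
  rw [hfinalA]
  have hfun : (fun (c v : Int) =>
      if PySem.Int.mod v K = 0 then c + PySem.Int.floordiv v K
      else c + (PySem.Int.floordiv v K + 1))
      = fun (c v : Int) => c + (if PySem.Int.mod v K = 0 then PySem.Int.floordiv v K
          else PySem.Int.floordiv v K + 1) := by
    funext c v
    split_ifs <;> ring
  rw [hfun]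
  rw [PySem.List.foldl_add]
  rw [List.map_reverse, List.sum_reverse, zero_add]
  set f : Int → Int := fun v =>
    if PySem.Int.mod v K = 0 then PySem.Int.floordiv v K else PySem.Int.floordiv v K + 1
    with hf
  -- each per-position sum S[j] is the number of occurrences of position j in L
  have hSgetD : ∀ j ∈ List.range kn, S.getD j 0 = ((L.count ((j : Nat) : Int) : Nat) : Int) := by
    intro j hj
    rw [List.mem_range] at hj
    rw [hS, getD_fold_zip _ init (by
      intro r hr
      obtain ⟨x, _, rfl⟩ := List.mem_map.1 hr
      rw [hinit]
      simp [length_bitsPad]) j]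
    have hinit0 : init.getD j 0 = 0 := by
      rw [hinit, List.getD_eq_getElem _ 0 (by simp [hj])]
      simp
    rw [hinit0, zero_add, List.map_map]
    have hterm : ∀ a ∈ A.take n,
        ((fun r => r.getD j 0) ∘ fun x => bitsPad x kn) a
        = (((posAux a.toNat 0).count ((j : Nat) : Int) : Nat) : Int) := by
      intro a ha
      have ha0 := hrows0 a ha
      simp only [Function.comp]
      rw [List.getD_eq_getElem _ 0 (by simp [length_bitsPad, hj])]
      rw [bitsPad_getElem kn a ha0 j hj, PySem.Int.band_one]
      obtain ⟨an, rfl⟩ := Int.eq_ofNat_of_zero_le ha0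
      have e1 : ((an : Int) >>> j) = ((an >>> j : Nat) : Int) := by
        simp [Int.shiftRight_eq_div_pow, Nat.shiftRight_eq_div_pow]
      rw [e1]
      rw [show PySem.Int.mod ((an >>> j : Nat) : Int) 2 = (((an >>> j) % 2 : Nat) : Int) from
        by exact_mod_cast PySem.Int.mod_natCast (an >>> j) 2]
      rw [show ((an : Int)).toNat = an from by simp]
      have hc := posAux_count an 0 j
      simp only [zero_add] at hc
      rw [hc]
    rw [List.map_congr_left hterm, hL, count_flatMap]
    push_cast
    rw [List.map_map]
    rfl
  -- turn A's sum over S into a sum over the positions 0..kn-1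
  conv_lhs => rw [list_eq_map_range_getD S, hSlen]
  rw [List.map_map]
  rw [List.map_congr_left (show ∀ j ∈ List.range kn,
      (f ∘ fun j => S.getD j 0) j = f ((L.count ((j : Nat) : Int) : Nat) : Int) from by
    intro j hj
    simp only [Function.comp]
    rw [hSgetD j hj])]
  -- ===== B's side =====
  simp only [min_op_alt]
  rw [pyRange_toNat N, ← hn, PySem.List.pyRange_zero_natCast, List.foldl_map]
  rw [b_outer_aux A n hnlen PySem.Dict.empty]
  have hloop : (A.take n).foldl (fun d a => pvBitLoop (a.natAbs + 1) a d) PySem.Dict.empty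
      = PySem.Dict.counter L := by
    rw [PySem.List.foldl_congr_mem (A.take n) _
      (fun d a => (posAux a.toNat 0).foldl
        (fun d j => d.insert j (d.getD j 0 + 1)) d) PySem.Dict.empty (by
      intro d a ha
      have ha0 := hrows0 a ha
      have hspec := pvBitLoop_spec a.toNat (a.natAbs + 1) d (by omega)
      rw [show ((a.toNat : Nat) : Int) = a from by omega] at hspec
      exact hspec)]
    rw [← List.foldl_flatMap, ← hL]
    exact PySem.Dict.foldl_insert_getD_add_one_eq_counter L
  rw [hloop]
  have hvals : PySem.Dict.values (PySem.Dict.counter L)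
      = (PySem.Set.ofList L).map (fun k => ((L.count k : Nat) : Int)) := by
    rw [PySem.Dict.values_eq_map_keys _ (PySem.Dict.nodup_keys_counter L) 0,
      PySem.Dict.keys_counter]
    exact List.map_congr_left (fun k _ => PySem.Dict.getD_counter L k)
  rw [hvals, List.map_map]
  -- compare the two sums through the distinct positions of L
  have hAside : ((List.range kn).map (fun j => f ((L.count ((j : Nat) : Int) : Nat) : Int))).sum
      = (((List.range kn).map (fun (j : Nat) => ((j : Nat) : Int))).map
          (fun x => f ((L.count x : Nat) : Int))).sum := by
    rw [List.map_map]
    rfl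
  rw [hAside]
  rw [sum_over_superset L ((List.range kn).map (fun (j : Nat) => ((j : Nat) : Int)))
    (List.Nodup.map (fun a b h => by exact_mod_cast h) List.nodup_range)
    (by
      intro x hx
      obtain ⟨h0, h1⟩ := hLmem x hx
      rw [List.mem_map]
      exact ⟨x.toNat, List.mem_range.2 (by omega), by omega⟩)
    (fun x => f ((L.count x : Nat) : Int))
    (by
      intro x hx
      show f ((List.count x L : Nat) : Int) = 0
      rw [List.count_eq_zero.2 hx]
      simp only [hf, Nat.cast_zero]
      exact ceil_zero K hK)]
  apply congrArg List.sum
  apply List.map_congr_left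
  intro k _
  simp only [Function.comp]
  rw [hf]
  exact ceil_div_eq _ K hK
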